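-- pv_equiv track=rewrite | github.com/mhdafrith/FuncAtlas | services/report_worker.py | _match_percent
-- ===== SOURCE A (Python) =====
-- from collections import Counter
--
-- def _match_percent(a, b):
--     def _clean(text):
--         out = []
--         for raw in text.splitlines():
--             s = raw.strip()
--             if not s or s.startswith('//') or s.startswith('/*') or s.startswith('*'):
--                 continue
--             out.append(s)
--         return out
--     lines_a = _clean(a); lines_b = _clean(b)
--     if not lines_a or not lines_b:
--         return 0
--     cnt_a = Counter(lines_a); cnt_b = Counter(lines_b)
--     matched = sum(min(cnt_a[ln], cnt_b[ln]) for ln in cnt_a)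
--     total   = max(len(lines_a), len(lines_b))
--     return int(round((matched / total) * 100))
-- ===== SOURCE B (Python) =====
-- def _match_percent(a, b):
--     def _keep(s):
--         if not s:
--             return False
--         if s.startswith('//'):
--             return False
--         if s.startswith('/*'):
--             return False
--         if s.startswith('*'):
--             return False
--         return True
--     lines_a = [s for s in map(str.strip, a.splitlines()) if _keep(s)]
--     lines_b = [s for s in map(str.strip, b.splitlines()) if _keep(s)]
--     sa, sb = sorted(lines_a), sorted(lines_b)
--     if not sa or not sb:
--         return 0
--     i = j = matched = 0
--     while i < len(sa) and j < len(sb):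
--         if sa[i] == sb[j]:
--             matched += 1; i += 1; j += 1
--         elif sa[i] < sb[j]:
--             i += 1
--         else:
--             j += 1
--     total = max(len(lines_a), len(lines_b))
--     return int(round((matched / total) * 100))
-- ===== Notes on version B (the rewrite author's own statement) =====
-- stated objective: alternative
-- what changed: matched is computed by sorting both cleaned line lists and counting equal pairs with a two-pointer merge instead of building two Counters and summing per-key minima; the clean step becomes map-strip-then-filter with an early-return keep predicate.
import Mathlib
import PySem

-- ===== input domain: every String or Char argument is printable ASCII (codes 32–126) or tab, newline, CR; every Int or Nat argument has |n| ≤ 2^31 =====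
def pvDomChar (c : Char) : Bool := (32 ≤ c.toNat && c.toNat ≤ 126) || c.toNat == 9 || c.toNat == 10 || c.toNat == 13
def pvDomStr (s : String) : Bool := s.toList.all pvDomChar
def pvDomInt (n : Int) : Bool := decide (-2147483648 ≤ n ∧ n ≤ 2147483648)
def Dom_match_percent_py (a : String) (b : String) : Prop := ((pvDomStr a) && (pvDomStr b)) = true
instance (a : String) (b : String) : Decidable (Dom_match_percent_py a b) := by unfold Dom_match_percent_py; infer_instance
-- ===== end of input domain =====

-- B sorts both cleaned line lists and counts matches with a two-pointer merge instead of A's two Counters (alternative algorithm, same result); each port carries its own exact integer model of the shared float expression int(round((matched/total)*100)).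


-- ===== PORT A =====
-- A's _clean skip condition: empty or a comment-like prefix, as one boolean chain (as A writes it)
def pvBad (s : String) : Bool :=
  s == "" || PySem.Str.startswith s "//" || PySem.Str.startswith s "/*" || PySem.Str.startswith s "*"

-- pvRne / pvFlog2 / pvToDub / pvRoundPct model A's expression int(round((matched / total) * 100))
-- EXACTLY over the integers: m/t rounded to the nearest-even 53-bit IEEE double (no overflow or
-- subnormals in range), times 100 rounded again, then Python's banker's round() of that double.
-- round-half-even of n/d (d > 0)
def pvRne (n d : Nat) : Nat :=
  let q := n / d; let r := n % d
  if 2 * r < d then q else if d < 2 * r then q + 1 else if q % 2 = 0 then q else q + 1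

-- floor(log2 (n/d)) for n, d > 0, from the integer logs of n and d
def pvFlog2 (n d : Nat) : Int :=
  let e0 : Int := (Nat.log2 n : Int) - (Nat.log2 d : Int)
  if 0 ≤ e0 then (if d * 2 ^ e0.toNat ≤ n then e0 else e0 - 1)
  else (if d ≤ n * 2 ^ (-e0).toNat then e0 else e0 - 1)

-- n/d (n, d > 0) as the nearest IEEE double: significand × 2^exponent
def pvToDub (n d : Nat) : Nat × Int :=
  let e := pvFlog2 n d
  let s := 52 - e
  if 0 ≤ s then (pvRne (n * 2 ^ s.toNat) d, -s) else (pvRne n (d * 2 ^ (-s).toNat), -s)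

-- exact integer model of A's int(round((m / t) * 100)) (guard makes it total; A calls it with 0 ≤ m, 0 < t)
def pvRoundPct (m t : Int) : Int :=
  if m ≤ 0 ∨ t ≤ 0 then 0 else
  let x := pvToDub m.toNat t.toNat
  let nd : Nat × Nat := if 0 ≤ x.2 then (x.1 * 100 * 2 ^ x.2.toNat, 1) else (x.1 * 100, 2 ^ (-x.2).toNat)
  let y := pvToDub nd.1 nd.2
  if 0 ≤ y.2 then ((y.1 * 2 ^ y.2.toNat : Nat) : Int) else (pvRne y.1 (2 ^ (-y.2).toNat) : Int)

def pvCleanA (text : String) : List String :=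
  (PySem.Str.splitlines text).foldl
    (fun out raw =>
      let s := PySem.Str.strip raw
      if pvBad s then out else out ++ [s]) []

def match_percent_py (a : String) (b : String) : Int :=
  let lines_a := pvCleanA a
  let lines_b := pvCleanA b
  if lines_a = [] ∨ lines_b = [] then 0 else
  let cnt_a := PySem.Dict.counter lines_a
  let cnt_b := PySem.Dict.counter lines_b
  let matched := cnt_a.keys.foldl (fun acc ln => acc + min (cnt_a.getD ln 0) (cnt_b.getD ln 0)) 0
  let total : Int := max (PySem.List.len lines_a) (PySem.List.len lines_b)
  pvRoundPct matched total

-- ===== PORT B =====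
-- B's _keep predicate: an early-return chain (as Source B writes it)
def pvKeep (s : String) : Bool :=
  if s = "" then false
  else if PySem.Str.startswith s "//" then false
  else if PySem.Str.startswith s "/*" then false
  else if PySem.Str.startswith s "*" then false
  else true

def pvCleanB (text : String) : List String :=
  ((PySem.Str.splitlines text).map PySem.Str.strip).filter pvKeep

-- the two-pointer merge count over the two sorted lists (Source B's while loop)
def pvMergeCount : List String → List String → Int
  | [], _ => 0
  | _ :: _, [] => 0
  | x :: xs, y :: ys =>
    if x = y then pvMergeCount xs ys + 1
    else if x < y then pvMergeCount xs (y :: ys)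
    else pvMergeCount (x :: xs) ys
termination_by xs ys => xs.length + ys.length

-- B's exact integer model of the same expression int(round((matched / total) * 100)), built
-- differently: round-half-even as quotient plus a carry bit, and the double's significand and
-- exponent found by a fuel-driven binary normalisation of n/d instead of log2 arithmetic.
def pvRneB (n d : Nat) : Nat :=
  n / d + (if d < 2 * (n % d) ∨ (d = 2 * (n % d) ∧ (n / d) % 2 = 1) then 1 else 0)

-- normalise n/d into [1,2) by doubling the small side, then read off the 53-bit significand
def pvNorm : Nat → Nat → Nat → Nat × Int
  | 0, _, _ => (0, 0)
  | f + 1, n, d =>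
    if 2 * d ≤ n then
      let p := pvNorm f n (2 * d); (p.1, p.2 + 1)
    else if n < d then
      let p := pvNorm f (2 * n) d; (p.1, p.2 - 1)
    else (pvRneB (n * 2 ^ 52) d, -52)

def pvDub (n d : Nat) : Nat × Int := pvNorm (n + d) n d

def pvPct (m t : Int) : Int :=
  if 0 < m ∧ 0 < t then
    let x := pvDub m.toNat t.toNat
    let y := match x.2 with
      | .ofNat k => pvDub (x.1 * 100 * 2 ^ k) 1
      | .negSucc k => pvDub (x.1 * 100) (2 ^ (k + 1))
    match y.2 with
    | .ofNat k => ((y.1 * 2 ^ k : Nat) : Int)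
    | .negSucc k => (pvRneB y.1 (2 ^ (k + 1)) : Int)
  else 0

def match_percent_py_alt (a : String) (b : String) : Int :=
  let lines_a := pvCleanB a
  let lines_b := pvCleanB b
  let sa := PySem.List.sorted lines_a (fun x => x)
  let sb := PySem.List.sorted lines_b (fun x => x)
  match sa, sb with
  | [], _ => 0
  | _ :: _, [] => 0
  | _ :: _, _ :: _ =>
    pvPct (pvMergeCount sa sb) (max (PySem.List.len lines_a) (PySem.List.len lines_b))

-- ===== PRECONDITION & SPEC =====
def Spec_match_percent_py (a : String) (b : String) (out : Int) : Prop := out = match_percent_py_alt a b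
instance (a : String) (b : String) (out : Int) : Decidable (Spec_match_percent_py a b out) := by unfold Spec_match_percent_py; infer_instance

-- ===== CLAIM (what is proved, stated in full; the proofs are below) =====
def Claim_equal_match_percent_py : Prop := ∀ (a : String) (b : String), Dom_match_percent_py a b → Spec_match_percent_py a b (match_percent_py a b)

-- ===== LEMMAS AND PROOFS =====

-- the two clean passes agree
lemma pvKeep_eq_not_bad (s : String) : pvKeep s = !pvBad s := by
  unfold pvKeep pvBad
  split_ifs <;> simp_all

lemma pvCleanA_eq (t : String) : pvCleanA t = pvCleanB t := by
  unfold pvCleanA pvCleanB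
  have aux : ∀ (l : List String) (acc : List String),
      l.foldl (fun out raw => let s := PySem.Str.strip raw; if pvBad s then out else out ++ [s]) acc
      = acc ++ (l.map PySem.Str.strip).filter pvKeep := by
    intro l
    induction l with
    | nil => simp
    | cons raw l ih =>
        intro acc
        by_cases hb : pvBad (PySem.Str.strip raw) <;>
          simp [hb, ih, List.filter, pvKeep_eq_not_bad]
  exact aux _ []

-- matched as A computes it = size of the multiset intersection
lemma matchedA_eq (la lb : List String) :
    (PySem.Dict.counter la).keys.foldl
      (fun acc ln => acc + min ((PySem.Dict.counter la).getD ln 0) ((PySem.Dict.counter lb).getD ln 0)) 0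
    = (((la : Multiset String)) ∩ (lb : Multiset String)).card := by
  rw [PySem.Dict.keys_counter, PySem.List.foldl_add, zero_add]
  simp only [PySem.Dict.getD_counter]
  have hnat : ((PySem.Set.ofList la).map (fun ln => min (List.count ln la) (List.count ln lb))).sum
      = (((la : Multiset String)) ∩ (lb : Multiset String)).card := by
    rw [← List.sum_toFinset _ (PySem.Set.nodup_ofList la)]
    have hfs : (PySem.Set.ofList la).toFinset = ((la : Multiset String)).toFinset := by
      ext z
      simp [List.mem_toFinset, PySem.Set.mem_ofList]
    rw [hfs]
    have hsub : (((la : Multiset String)) ∩ (lb : Multiset String)).toFinset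
        ⊆ ((la : Multiset String)).toFinset := by
      intro z hz
      simp only [Multiset.mem_toFinset, Multiset.mem_inter] at hz ⊢
      exact hz.1
    calc (((la : Multiset String)).toFinset).sum (fun ln => min (List.count ln la) (List.count ln lb))
        = ∑ x ∈ ((la : Multiset String)).toFinset,
            Multiset.count x (((la : Multiset String)) ∩ (lb : Multiset String)) := by
          refine Finset.sum_congr rfl fun x _ => ?_
          rw [Multiset.count_inter, Multiset.coe_count, Multiset.coe_count]
      _ = ∑ x ∈ (((la : Multiset String)) ∩ (lb : Multiset String)).toFinset,
            Multiset.count x (((la : Multiset String)) ∩ (lb : Multiset String)) := by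
          refine (Finset.sum_subset hsub fun x _ hx => ?_).symm
          exact Multiset.count_eq_zero.mpr (by simpa [Multiset.mem_toFinset] using hx)
      _ = (((la : Multiset String)) ∩ (lb : Multiset String)).card :=
          Multiset.toFinset_sum_count_eq _
  calc ((PySem.Set.ofList la).map (fun ln => min ((List.count ln la : Int)) ((List.count ln lb : Int)))).sum
      = (((PySem.Set.ofList la).map (fun ln => min (List.count ln la) (List.count ln lb))).map
          (Nat.cast : Nat → Int)).sum := by
        rw [List.map_map]
        refine congrArg List.sum (List.map_congr_left fun x _ => ?_)
        simp [Nat.cast_min]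
    _ = (((la : Multiset String)) ∩ (lb : Multiset String)).card := by
        rw [← Nat.cast_list_sum, hnat]

-- matched as B computes it = size of the multiset intersection
lemma pvMergeCount_eq (xs ys : List String)
    (hx : xs.Pairwise (· ≤ ·)) (hy : ys.Pairwise (· ≤ ·)) :
    pvMergeCount xs ys = (((xs : Multiset String)) ∩ (ys : Multiset String)).card := by
  induction xs, ys using pvMergeCount.induct with
  | case1 ys => simp [pvMergeCount]
  | case2 x xs => simp [pvMergeCount]
  | case3 xs y ys ih =>
      rw [pvMergeCount, if_pos rfl, ih hx.of_cons hy.of_cons]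
      have h : ((y :: xs : List String) : Multiset String) ∩ ((y :: ys : List String) : Multiset String)
          = y ::ₘ ((xs : Multiset String) ∩ (ys : Multiset String)) := by
        rw [← Multiset.cons_coe, ← Multiset.cons_coe,
            Multiset.cons_inter_of_pos _ (Multiset.mem_cons_self y _), Multiset.erase_cons_head]
      rw [h, Multiset.card_cons]
      push_cast; ring
  | case4 x xs y ys hne hlt ih =>
      have hnot : x ∉ ((y :: ys : List String) : Multiset String) := by
        intro hm
        rcases List.mem_cons.mp (Multiset.mem_coe.mp hm) with h | h
        · exact hne h
        · exact absurd hlt (not_lt.mpr (List.rel_of_pairwise_cons hy h))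
      rw [pvMergeCount, if_neg hne, if_pos hlt, ih hx.of_cons hy]
      have h : ((x :: xs : List String) : Multiset String) ∩ ((y :: ys : List String) : Multiset String)
          = ((xs : Multiset String)) ∩ ((y :: ys : List String) : Multiset String) := by
        rw [← Multiset.cons_coe (α := String) x xs, Multiset.cons_inter_of_neg _ hnot]
      rw [h]
  | case5 x xs y ys hne hnlt ih =>
      have hyx : y < x := lt_of_le_of_ne (not_lt.mp hnlt) (Ne.symm hne)
      have hnot : y ∉ ((x :: xs : List String) : Multiset String) := by
        intro hm
        rcases List.mem_cons.mp (Multiset.mem_coe.mp hm) with h | h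
        · exact hne h.symm
        · exact absurd hyx (not_lt.mpr (List.rel_of_pairwise_cons hx h))
      rw [pvMergeCount, if_neg hne, if_neg hnlt, ih hx hy.of_cons]
      have h : ((x :: xs : List String) : Multiset String) ∩ ((y :: ys : List String) : Multiset String)
          = ((x :: xs : List String) : Multiset String) ∩ ((ys : List String) : Multiset String) := by
        rw [Multiset.inter_comm, ← Multiset.cons_coe (α := String) y ys,
            Multiset.cons_inter_of_neg _ hnot, Multiset.inter_comm]
      rw [h]

-- ===== the two float models agree =====
lemma pvRneB_eq (n d : Nat) : pvRneB n d = pvRne n d := by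
  simp only [pvRneB, pvRne]
  have := Nat.mod_two_eq_zero_or_one (n / d)
  split_ifs <;> omega

lemma pvRne_scale (a b : Nat) : pvRne (2 * a) (2 * b) = pvRne a b := by
  simp only [pvRne]
  rcases Nat.eq_zero_or_pos b with hb | hb
  · subst hb; simp
  · have h1 : 2 * a / (2 * b) = a / b := Nat.mul_div_mul_left _ _ (by norm_num)
    have h2 : 2 * a % (2 * b) = 2 * (a % b) := Nat.mul_mod_mul_left _ _ _
    rw [h1, h2]
    split_ifs <;> omega

-- helper inequality movers in ℚ
lemma pv_le_shift (x y : ℚ) (e : ℤ) (hx : 0 ≤ x) :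
    x * (2:ℚ) ^ e ≤ y ↔ x ≤ y * (2:ℚ) ^ (-e) := by
  rw [zpow_neg, ← div_eq_mul_inv, le_div_iff₀ (by positivity)]

lemma pv_lt_shift (x y : ℚ) (e : ℤ) :
    x < y * (2:ℚ) ^ e ↔ x * (2:ℚ) ^ (-e) < y := by
  rw [zpow_neg, ← div_eq_mul_inv, div_lt_iff₀ (by positivity), mul_comm y]

lemma pvFlog2_spec (n d : Nat) (hn : 0 < n) (hd : 0 < d) :
    (d : ℚ) * (2 : ℚ) ^ (pvFlog2 n d) ≤ (n : ℚ) ∧ (n : ℚ) < (d : ℚ) * (2 : ℚ) ^ (pvFlog2 n d + 1) := by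
  have hnlow : ((2:ℚ)) ^ ((Nat.log2 n : ℤ)) ≤ (n : ℚ) := by
    rw [zpow_natCast]; exact_mod_cast Nat.log2_self_le hn.ne'
  have hnhigh : (n : ℚ) < (2:ℚ) ^ ((Nat.log2 n : ℤ) + 1) := by
    have : (n : ℚ) < ((2 ^ (Nat.log2 n + 1) : ℕ) : ℚ) := by exact_mod_cast Nat.lt_log2_self
    simpa [zpow_natCast, pow_succ, zpow_add₀ (two_ne_zero (α := ℚ))] using this
  have hdlow : ((2:ℚ)) ^ ((Nat.log2 d : ℤ)) ≤ (d : ℚ) := by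
    rw [zpow_natCast]; exact_mod_cast Nat.log2_self_le hd.ne'
  have hdhigh : (d : ℚ) < (2:ℚ) ^ ((Nat.log2 d : ℤ) + 1) := by
    have : (d : ℚ) < ((2 ^ (Nat.log2 d + 1) : ℕ) : ℚ) := by exact_mod_cast Nat.lt_log2_self
    simpa [zpow_natCast, pow_succ, zpow_add₀ (two_ne_zero (α := ℚ))] using this
  simp only [pvFlog2]
  set Ln : ℤ := (Nat.log2 n : ℤ) with hLn
  set Ld : ℤ := (Nat.log2 d : ℤ) with hLd
  by_cases h : 0 ≤ Ln - Ld
  · have hto : ((Ln - Ld).toNat : ℤ) = Ln - Ld := Int.toNat_of_nonneg h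
    by_cases hc : d * 2 ^ (Ln - Ld).toNat ≤ n
    · simp only [h, if_true, hc, if_true]
      constructor
      · calc (d:ℚ) * (2:ℚ) ^ (Ln - Ld)
            = (d:ℚ) * ((2:ℚ) ^ ((Ln - Ld).toNat)) := by rw [← zpow_natCast, hto]
          _ = ((d * 2 ^ (Ln - Ld).toNat : ℕ) : ℚ) := by push_cast; ring
          _ ≤ (n : ℚ) := by exact_mod_cast hc
      · calc (n : ℚ) < (2:ℚ) ^ (Ln + 1) := hnhigh
          _ = (2:ℚ) ^ Ld * (2:ℚ) ^ (Ln - Ld + 1) := by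
              rw [← zpow_add₀ (two_ne_zero (α := ℚ))]; ring_nf
          _ ≤ (d:ℚ) * (2:ℚ) ^ (Ln - Ld + 1) := by
              have : (0:ℚ) < (2:ℚ) ^ (Ln - Ld + 1) := by positivity
              nlinarith [hdlow]
    · simp only [h, if_true, hc, if_false]
      constructor
      · have hdq : (d : ℚ) < (2:ℚ) ^ (Ld + 1) := hdhigh
        calc (d:ℚ) * (2:ℚ) ^ (Ln - Ld - 1)
            ≤ (2:ℚ) ^ (Ld + 1) * (2:ℚ) ^ (Ln - Ld - 1) := by
              have : (0:ℚ) < (2:ℚ) ^ (Ln - Ld - 1) := by positivity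
              nlinarith
          _ = (2:ℚ) ^ Ln := by rw [← zpow_add₀ (two_ne_zero (α := ℚ))]; ring_nf
          _ ≤ (n : ℚ) := hnlow
      · have : (n : ℚ) < (d:ℚ) * (2:ℚ) ^ (Ln - Ld) := by
          have h2 : (n:ℚ) < ((d * 2 ^ (Ln - Ld).toNat : ℕ) : ℚ) := by exact_mod_cast Nat.lt_of_not_le hc
          calc (n:ℚ) < ((d * 2 ^ (Ln - Ld).toNat : ℕ) : ℚ) := h2
            _ = (d:ℚ) * (2:ℚ) ^ (Ln - Ld) := by push_cast [← zpow_natCast (2:ℚ), hto]; ring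
        simpa using this
  · have hk : 0 ≤ Ld - Ln := by omega
    have hto : ((-(Ln - Ld)).toNat : ℤ) = Ld - Ln := by omega
    by_cases hc : d ≤ n * 2 ^ (-(Ln - Ld)).toNat
    · simp only [h, if_false, hc, if_true]
      constructor
      · rw [pv_le_shift _ _ _ (by positivity)]
        calc (d:ℚ) ≤ ((n * 2 ^ (-(Ln - Ld)).toNat : ℕ) : ℚ) := by exact_mod_cast hc
          _ = (n:ℚ) * (2:ℚ) ^ (-(Ln - Ld)) := by push_cast [← zpow_natCast (2:ℚ), hto]; ring_nf
      · rw [pv_lt_shift]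
        calc (n:ℚ) * (2:ℚ) ^ (-(Ln - Ld + 1))
            < (2:ℚ) ^ (Ln + 1) * (2:ℚ) ^ (-(Ln - Ld + 1)) := by
              have : (0:ℚ) < (2:ℚ) ^ (-(Ln - Ld + 1)) := by positivity
              nlinarith
          _ = (2:ℚ) ^ Ld := by rw [← zpow_add₀ (two_ne_zero (α := ℚ))]; ring_nf
          _ ≤ (d : ℚ) := hdlow
    · simp only [h, if_false, hc, if_false]
      constructor
      · rw [pv_le_shift _ _ _ (by positivity)]
        refine le_of_lt ?_
        calc (d:ℚ) < (2:ℚ) ^ (Ld + 1) := hdhigh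
          _ = (2:ℚ) ^ Ln * (2:ℚ) ^ (-(Ln - Ld - 1)) := by
              rw [← zpow_add₀ (two_ne_zero (α := ℚ))]; ring_nf
          _ ≤ (n:ℚ) * (2:ℚ) ^ (-(Ln - Ld - 1)) := by
              have : (0:ℚ) < (2:ℚ) ^ (-(Ln - Ld - 1)) := by positivity
              nlinarith
      · rw [pv_lt_shift]
        have h2 : ((n * 2 ^ (-(Ln - Ld)).toNat : ℕ) : ℚ) < (d:ℚ) := by
          exact_mod_cast Nat.lt_of_not_le hc
        calc (n:ℚ) * (2:ℚ) ^ (-(Ln - Ld - 1 + 1))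
            = ((n * 2 ^ (-(Ln - Ld)).toNat : ℕ) : ℚ) := by
              push_cast [← zpow_natCast (2:ℚ), hto]; ring_nf
          _ < (d:ℚ) := h2

lemma pvFlog2_unique (n d : Nat) (e : ℤ) (hn : 0 < n) (hd : 0 < d)
    (h1 : (d : ℚ) * (2 : ℚ) ^ e ≤ (n : ℚ)) (h2 : (n : ℚ) < (d : ℚ) * (2 : ℚ) ^ (e + 1)) :
    pvFlog2 n d = e := by
  obtain ⟨s1, s2⟩ := pvFlog2_spec n d hn hd
  set E := pvFlog2 n d with hE
  by_contra hne
  have hdq : (0:ℚ) < (d:ℚ) := by exact_mod_cast hd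
  rcases lt_or_gt_of_ne hne with hlt | hgt
  · have : E + 1 ≤ e := by omega
    have hm : (2:ℚ) ^ (E + 1) ≤ (2:ℚ) ^ e := zpow_le_zpow_right₀ (by norm_num) this
    nlinarith
  · have : e + 1 ≤ E := by omega
    have hm : (2:ℚ) ^ (e + 1) ≤ (2:ℚ) ^ E := zpow_le_zpow_right₀ (by norm_num) this
    nlinarith

lemma pvFlog2_base (n d : Nat) (hd : 0 < d) (h1 : d ≤ n) (h2 : n < 2 * d) : pvFlog2 n d = 0 := by
  refine pvFlog2_unique n d 0 (by omega) hd ?_ ?_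
  · simpa using (by exact_mod_cast h1 : (d:ℚ) ≤ (n:ℚ))
  · have : (n:ℚ) < 2 * (d:ℚ) := by exact_mod_cast h2
    simpa [zpow_one, mul_comm] using this

lemma pvFlog2_double_den (n d : Nat) (hn : 0 < n) (hd : 0 < d) :
    pvFlog2 n (2 * d) = pvFlog2 n d - 1 := by
  obtain ⟨s1, s2⟩ := pvFlog2_spec n d hn hd
  refine pvFlog2_unique n (2 * d) _ hn (by omega) ?_ ?_
  · calc ((2 * d : ℕ):ℚ) * (2:ℚ) ^ (pvFlog2 n d - 1)
        = (d:ℚ) * (2:ℚ) ^ (pvFlog2 n d) := by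
          push_cast
          rw [zpow_sub₀ (two_ne_zero (α := ℚ))]
          ring
      _ ≤ (n:ℚ) := s1
  · calc (n:ℚ) < (d:ℚ) * (2:ℚ) ^ (pvFlog2 n d + 1) := s2
      _ = ((2 * d : ℕ):ℚ) * (2:ℚ) ^ (pvFlog2 n d - 1 + 1) := by
          have he : pvFlog2 n d - 1 + 1 = pvFlog2 n d := by ring
          rw [he, zpow_add₀ (two_ne_zero (α := ℚ)) (pvFlog2 n d) 1, zpow_one]
          push_cast; ring
lemma pvFlog2_double_num (n d : Nat) (hn : 0 < n) (hd : 0 < d) :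
    pvFlog2 (2 * n) d = pvFlog2 n d + 1 := by
  obtain ⟨s1, s2⟩ := pvFlog2_spec n d hn hd
  refine pvFlog2_unique (2 * n) d _ (by omega) hd ?_ ?_
  · calc (d:ℚ) * (2:ℚ) ^ (pvFlog2 n d + 1)
        = 2 * ((d:ℚ) * (2:ℚ) ^ (pvFlog2 n d)) := by
          rw [zpow_add₀ (two_ne_zero (α := ℚ)) (pvFlog2 n d) 1, zpow_one]; ring
      _ ≤ ((2 * n : ℕ):ℚ) := by push_cast; nlinarith
  · calc ((2 * n : ℕ):ℚ) = 2 * (n:ℚ) := by push_cast; ring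
      _ < 2 * ((d:ℚ) * (2:ℚ) ^ (pvFlog2 n d + 1)) := by nlinarith
      _ = (d:ℚ) * (2:ℚ) ^ (pvFlog2 n d + 1 + 1) := by
          rw [zpow_add₀ (two_ne_zero (α := ℚ)) (pvFlog2 n d + 1) 1,
              zpow_add₀ (two_ne_zero (α := ℚ)) (pvFlog2 n d) 1, zpow_one]; ring

lemma pvToDub_base (n d : Nat) (hd : 0 < d) (h1 : d ≤ n) (h2 : n < 2 * d) :
    pvToDub n d = (pvRne (n * 2 ^ 52) d, -52) := by
  have h52 : ((52:ℤ)).toNat = 52 := rfl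
  simp only [pvToDub, pvFlog2_base n d hd h1 h2]
  norm_num [h52]

lemma pvToDub_double_den (n d : Nat) (hn : 0 < n) (hd : 0 < d) :
    pvToDub n (2 * d) = ((pvToDub n d).1, (pvToDub n d).2 - 1) := by
  simp only [pvToDub, pvFlog2_double_den n d hn hd]
  set e := pvFlog2 n d with he
  by_cases hs : (0:ℤ) ≤ 52 - e
  · have hs' : (0:ℤ) ≤ 52 - (e - 1) := by omega
    rw [if_pos hs, if_pos hs']
    refine Prod.ext ?_ (by omega)
    have ht : (52 - (e - 1)).toNat = (52 - e).toNat + 1 := by omega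
    rw [ht, pow_succ,
        show n * (2 ^ (52 - e).toNat * 2) = 2 * (n * 2 ^ (52 - e).toNat) from by ring,
        pvRne_scale]
  · by_cases he53 : e = 53
    · have hs' : (0:ℤ) ≤ 52 - (e - 1) := by omega
      rw [if_neg hs, if_pos hs']
      refine Prod.ext ?_ (by omega)
      have u1 : (52 - (e - 1)).toNat = 0 := by omega
      have u2 : (-(52 - e)).toNat = 1 := by omega
      rw [u1, u2, pow_zero, mul_one, pow_one, mul_comm d 2]
    · have hs' : ¬ (0:ℤ) ≤ 52 - (e - 1) := by omega
      rw [if_neg hs, if_neg hs']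
      refine Prod.ext ?_ (by omega)
      have ht : (-(52 - e)).toNat = (-(52 - (e - 1))).toNat + 1 := by omega
      rw [ht, pow_succ]
      congr 1
      ring

lemma pvToDub_double_num (n d : Nat) (hn : 0 < n) (hd : 0 < d) :
    pvToDub (2 * n) d = ((pvToDub n d).1, (pvToDub n d).2 + 1) := by
  simp only [pvToDub, pvFlog2_double_num n d hn hd]
  set e := pvFlog2 n d with he
  by_cases hs : (0:ℤ) ≤ 52 - (e + 1)
  · have hs' : (0:ℤ) ≤ 52 - e := by omega
    rw [if_pos hs, if_pos hs']
    refine Prod.ext ?_ (by omega)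
    have ht : (52 - e).toNat = (52 - (e + 1)).toNat + 1 := by omega
    rw [ht, pow_succ]
    congr 1
    ring
  · by_cases he52 : e = 52
    · have hs' : (0:ℤ) ≤ 52 - e := by omega
      rw [if_neg hs, if_pos hs']
      refine Prod.ext ?_ (by omega)
      have u1 : (-(52 - (e + 1))).toNat = 1 := by omega
      have u2 : (52 - e).toNat = 0 := by omega
      rw [u1, u2, pow_zero, mul_one, pow_one, mul_comm d 2, pvRne_scale]
    · have hs' : ¬ (0:ℤ) ≤ 52 - e := by omega
      rw [if_neg hs, if_neg hs']
      refine Prod.ext ?_ (by omega)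
      have ht : (-(52 - e)).toNat + 1 = (-(52 - (e + 1))).toNat := by omega
      rw [← ht, pow_succ,
          show d * (2 ^ (-(52 - e)).toNat * 2) = 2 * (d * 2 ^ (-(52 - e)).toNat) from by ring,
          pvRne_scale]

lemma pvNorm_base (f n d : Nat) (hd : 0 < d) (h1 : d ≤ n) (h2 : n < 2 * d) :
    pvNorm (f + 1) n d = (pvRneB (n * 2 ^ 52) d, -52) := by
  have c1 : ¬ 2 * d ≤ n := by omega
  have c2 : ¬ n < d := by omega
  simp [pvNorm, c1, c2]

lemma pvNorm_eq_down (f : Nat) : ∀ n d : Nat, 0 < d → d ≤ n → n ≤ 2 ^ f * d →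
    pvNorm (f + 1) n d = pvToDub n d := by
  induction f with
  | zero =>
      intro n d hd hle hf
      rw [pow_zero, one_mul] at hf
      have h2 : n < 2 * d := by omega
      rw [pvNorm_base 0 n d hd hle h2, pvToDub_base n d hd hle h2, pvRneB_eq]
  | succ f ih =>
      intro n d hd hle hf
      by_cases hc : 2 * d ≤ n
      · have hstep : pvNorm (f + 1 + 1) n d = ((pvNorm (f + 1) n (2 * d)).1, (pvNorm (f + 1) n (2 * d)).2 + 1) := by
          simp [pvNorm, hc]
        rw [hstep, ih n (2 * d) (by omega) hc (by rw [pow_succ, mul_assoc] at hf; exact hf),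
            pvToDub_double_den n d (by omega) hd]
        exact Prod.ext rfl (by simp)
      · have h2 : n < 2 * d := by omega
        rw [pvNorm_base (f + 1) n d hd hle h2, pvToDub_base n d hd hle h2, pvRneB_eq]

lemma pvNorm_eq_up (f : Nat) : ∀ n d : Nat, 0 < n → n < d → d ≤ 2 ^ f * n →
    pvNorm (f + 1) n d = pvToDub n d := by
  induction f with
  | zero =>
      intro n d hn hlt hf
      rw [pow_zero, one_mul] at hf
      omega
  | succ f ih =>
      intro n d hn hlt hf
      have c1 : ¬ 2 * d ≤ n := by omega
      have hstep : pvNorm (f + 1 + 1) n d = ((pvNorm (f + 1) (2 * n) d).1, (pvNorm (f + 1) (2 * n) d).2 - 1) := by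
        simp [pvNorm, c1, hlt]
      by_cases hc : 2 * n < d
      · rw [hstep, ih (2 * n) d (by omega) hc (by rw [pow_succ, mul_assoc] at hf; exact hf),
            pvToDub_double_num n d hn (by omega)]
        exact Prod.ext rfl (by simp)
      · have hle : d ≤ 2 * n := by omega
        have h2 : 2 * n < 2 * d := by omega
        rw [hstep, pvNorm_base f (2 * n) d (by omega) hle h2, pvRneB_eq,
            ← pvToDub_base (2 * n) d (by omega) hle h2,
            pvToDub_double_num n d hn (by omega)]
        exact Prod.ext rfl (by simp)

lemma pvDub_eq (n d : Nat) (hn : 0 < n) (hd : 0 < d) : pvDub n d = pvToDub n d := by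
  obtain ⟨f, hf⟩ : ∃ f, n + d = f + 1 := ⟨n + d - 1, by omega⟩
  rw [pvDub, hf]
  have hpow : ∀ m : Nat, m < 2 ^ m := fun m => Nat.lt_two_pow_self
  by_cases hc : d ≤ n
  · refine pvNorm_eq_down f n d hd hc ?_
    have h1 : n < 2 ^ n := hpow n
    have h2 : 2 ^ n ≤ 2 ^ f := Nat.pow_le_pow_right (by norm_num) (by omega)
    calc n ≤ 2 ^ f := by omega
      _ ≤ 2 ^ f * d := Nat.le_mul_of_pos_right _ hd
  · refine pvNorm_eq_up f n d hn (by omega) ?_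
    have h1 : d < 2 ^ d := hpow d
    have h2 : 2 ^ d ≤ 2 ^ f := Nat.pow_le_pow_right (by norm_num) (by omega)
    calc d ≤ 2 ^ f := by omega
      _ ≤ 2 ^ f * n := Nat.le_mul_of_pos_right _ hn

lemma pvRne_pos (n d : Nat) (hd : 0 < d) (hle : d ≤ n) : 0 < pvRne n d := by
  have h1 : 1 ≤ n / d := (Nat.one_le_div_iff hd).mpr hle
  simp only [pvRne]
  split_ifs <;> omega

lemma pvToDub_pos (n d : Nat) (hn : 0 < n) (hd : 0 < d) : 0 < (pvToDub n d).1 := by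
  obtain ⟨s1, s2⟩ := pvFlog2_spec n d hn hd
  simp only [pvToDub]
  set e := pvFlog2 n d with he
  by_cases hs : (0:ℤ) ≤ 52 - e
  · rw [if_pos hs]
    refine pvRne_pos _ _ hd ?_
    have hq : (d:ℚ) ≤ (n:ℚ) * (2:ℚ) ^ (((52 - e).toNat : ℕ) : ℤ) := by
      have h1 : (d:ℚ) ≤ (n:ℚ) * (2:ℚ) ^ (-e) := (pv_le_shift _ _ _ (by positivity)).mp s1
      have hm : (2:ℚ) ^ (-e) ≤ (2:ℚ) ^ (((52 - e).toNat : ℕ) : ℤ) :=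
        zpow_le_zpow_right₀ (by norm_num) (by omega)
      nlinarith [show (0:ℚ) ≤ (n:ℚ) from by positivity]
    rw [zpow_natCast] at hq
    exact_mod_cast hq
  · rw [if_neg hs]
    refine pvRne_pos _ _ (Nat.mul_pos hd (pow_pos (by norm_num) _)) ?_
    have hq : (d:ℚ) * (2:ℚ) ^ ((((-(52 - e)).toNat : ℕ)) : ℤ) ≤ (n:ℚ) := by
      have hm : (2:ℚ) ^ ((((-(52 - e)).toNat : ℕ)) : ℤ) ≤ (2:ℚ) ^ e :=
        zpow_le_zpow_right₀ (by norm_num) (by omega)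
      nlinarith [show (0:ℚ) ≤ (d:ℚ) from by positivity]
    rw [zpow_natCast] at hq
    exact_mod_cast hq

lemma pvPct_eq (m t : Int) : pvPct m t = pvRoundPct m t := by
  by_cases h : 0 < m ∧ 0 < t
  · obtain ⟨hm, ht⟩ := h
    have hM : 0 < m.toNat := by omega
    have hT : 0 < t.toNat := by omega
    have hx1 : 0 < (pvToDub m.toNat t.toNat).1 := pvToDub_pos _ _ hM hT
    simp only [pvPct, pvRoundPct, if_pos (And.intro hm ht),
               if_neg (show ¬ (m ≤ 0 ∨ t ≤ 0) from by omega)]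
    rw [pvDub_eq _ _ hM hT]
    rcases h2 : (pvToDub m.toNat t.toNat).2 with k | k
    · simp only [h2]
      rw [show Int.ofNat k = (k:ℤ) from rfl, if_pos (Int.natCast_nonneg k), Int.toNat_natCast]
      have harg : 0 < (pvToDub m.toNat t.toNat).1 * 100 * 2 ^ k :=
        Nat.mul_pos (Nat.mul_pos hx1 (by norm_num)) (pow_pos (by norm_num) _)
      rw [pvDub_eq _ _ harg (by norm_num)]
      rcases h3 : (pvToDub ((pvToDub m.toNat t.toNat).1 * 100 * 2 ^ k) 1).2 with j | j
      · simp only [h3]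
        rw [show Int.ofNat j = (j:ℤ) from rfl, if_pos (Int.natCast_nonneg j), Int.toNat_natCast]
      · simp only [h3]
        rw [if_neg (not_le.mpr (Int.negSucc_lt_zero j)), pvRneB_eq]
        congr 2
    · simp only [h2]
      rw [if_neg (not_le.mpr (Int.negSucc_lt_zero k))]
      have hden : (-(Int.negSucc k)).toNat = k + 1 := by simp [Int.neg_negSucc]
      rw [hden]
      have harg : 0 < (pvToDub m.toNat t.toNat).1 * 100 := Nat.mul_pos hx1 (by norm_num)
      rw [pvDub_eq _ _ harg (pow_pos (by norm_num) _)]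
      rcases h3 : (pvToDub ((pvToDub m.toNat t.toNat).1 * 100) (2 ^ (k + 1))).2 with j | j
      · simp only [h3]
        rw [show Int.ofNat j = (j:ℤ) from rfl, if_pos (Int.natCast_nonneg j), Int.toNat_natCast]
      · simp only [h3]
        rw [if_neg (not_le.mpr (Int.negSucc_lt_zero j)), pvRneB_eq]
        congr 2
  · have h' : m ≤ 0 ∨ t ≤ 0 := by
      rcases not_and_or.mp h with h1 | h1
      · exact Or.inl (by omega)
      · exact Or.inr (by omega)
    simp [pvPct, pvRoundPct, h, h']

-- ===== VERDICT (by name: the statement is the Claim_ definition above) =====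
theorem match_percent_py_spec : Claim_equal_match_percent_py := by
  intro a b _
  simp only [Spec_match_percent_py, match_percent_py, match_percent_py_alt]
  rw [← pvCleanA_eq a, ← pvCleanA_eq b]
  have hnil : ∀ xs : List String, PySem.List.sorted xs (fun x => x) = [] ↔ xs = [] := by
    intro xs
    constructor
    · intro h
      have hp := PySem.List.sorted_perm xs (fun x => x) false
      rw [h] at hp
      exact hp.symm.eq_nil
    · intro h
      subst h
      exact (PySem.List.sorted_perm ([] : List String) (fun x => x) false).eq_nil
  by_cases ha : pvCleanA a = []
  · rw [if_pos (Or.inl ha), (hnil _).mpr ha]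
  · by_cases hb : pvCleanA b = []
    · rcases List.exists_cons_of_ne_nil (fun h => ha ((hnil _).mp h)) with ⟨z, zs, hz⟩
      rw [if_pos (Or.inr hb), (hnil _).mpr hb, hz]
    · rcases List.exists_cons_of_ne_nil (fun h => ha ((hnil _).mp h)) with ⟨z, zs, hz⟩
      rcases List.exists_cons_of_ne_nil (fun h => hb ((hnil _).mp h)) with ⟨w, ws, hw⟩
      rw [if_neg (by simp [ha, hb])]
      simp only [hz, hw]
      rw [← hz, ← hw, pvPct_eq]
      congr 1
      rw [matchedA_eq,
          pvMergeCount_eq _ _ (PySem.List.sorted_pairwise (pvCleanA a) (fun x => x))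
            (PySem.List.sorted_pairwise (pvCleanA b) (fun x => x))]
      have e1 : ((PySem.List.sorted (pvCleanA a) (fun x => x) : List String) : Multiset String) = (pvCleanA a : Multiset String) :=
        Multiset.coe_eq_coe.mpr (PySem.List.sorted_perm _ _ _)
      have e2 : ((PySem.List.sorted (pvCleanA b) (fun x => x) : List String) : Multiset String) = (pvCleanA b : Multiset String) :=
        Multiset.coe_eq_coe.mpr (PySem.List.sorted_perm _ _ _)
      rw [e1, e2]
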